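-- pv_equiv track=rewrite | github.com/teymurrzayev/python-naa | exam/dist_plan_performance.py | dist_plan_performance
-- ===== SOURCE A (Python) =====
-- def dist_plan_performance(calories, k, lower, upper):
--     total = 0
--     for i in range(len(calories)-k+1):
--         s = sum(calories[i:i+k])
--         if s < lower:
--             total -= 1
--         elif s > upper:
--             total += 1
--     return total
-- ===== SOURCE B (Python) =====
-- def _score(s, lower, upper):
--     return -1 if s < lower else (1 if s > upper else 0)
--
--
-- def dist_plan_performance(calories, k, lower, upper):
--     n = len(calories)
--     if k < 1 or k > n:
--         return 0
--     s = sum(calories[:k])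
--     total = _score(s, lower, upper)
--     for i in range(k, n):
--         s += calories[i] - calories[i - k]
--         total += _score(s, lower, upper)
--     return total
-- ===== Notes on version B (the rewrite author's own statement) =====
-- stated objective: faster
-- what changed: A re-sums every k-element slice from scratch; B computes the first window sum once and slides it across the list, updating it in O(1) per step.
-- outside the precondition, e.g. on dist_plan_performance([5, 6], -1, 1, 0): A returns -2, B returns 0; on dist_plan_performance([1, 2], 0, 1, 0): A returns -3, B returns 0
import Mathlib
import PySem

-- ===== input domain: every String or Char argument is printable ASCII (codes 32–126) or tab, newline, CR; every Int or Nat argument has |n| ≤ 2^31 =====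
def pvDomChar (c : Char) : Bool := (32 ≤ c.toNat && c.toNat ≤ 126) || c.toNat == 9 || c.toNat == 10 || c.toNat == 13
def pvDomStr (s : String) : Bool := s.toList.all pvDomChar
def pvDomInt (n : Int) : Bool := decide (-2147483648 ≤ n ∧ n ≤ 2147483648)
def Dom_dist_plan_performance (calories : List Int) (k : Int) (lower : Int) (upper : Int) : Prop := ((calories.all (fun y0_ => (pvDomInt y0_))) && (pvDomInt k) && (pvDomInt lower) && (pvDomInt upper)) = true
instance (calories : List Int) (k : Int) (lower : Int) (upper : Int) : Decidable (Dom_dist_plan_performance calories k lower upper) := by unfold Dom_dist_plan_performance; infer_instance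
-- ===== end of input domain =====

-- B replaces A's per-window slice re-summation (O(n·k)) by a single sliding running sum (O(n)).

-- ===== PORT A =====
-- literal transliteration of A: for i in range(len(calories)-k+1): s = sum(calories[i:i+k]); …
def dist_plan_performance (calories : List Int) (k : Int) (lower : Int) (upper : Int) : Int :=
  (PySem.List.pyRange 0 ((calories.length : Int) - k + 1) 1).foldl
    (fun total i =>
      let s := (PySem.List.slice calories (some i) (some (i + k))).sum
      if s < lower then total - 1
      else if s > upper then total + 1
      else total) 0

-- ===== PORT B =====
-- helper _score of Source B
def pvScore (s : Int) (lower : Int) (upper : Int) : Int :=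
  if s < lower then -1 else if s > upper then 1 else 0

-- literal transliteration of Source B: guard, initial window sum, then one sliding pass.
-- calories[i] / calories[i-k] are ported with pyGetD (exact: the loop keeps k ≤ i < n, so both indices are in range).
def dist_plan_performance_alt (calories : List Int) (k : Int) (lower : Int) (upper : Int) : Int :=
  let n : Int := calories.length
  if k < 1 ∨ k > n then 0
  else
    let s0 := (PySem.List.slice calories none (some k)).sum
    let r := (PySem.List.pyRange k n 1).foldl
      (fun (st : Int × Int) i =>
        let s := st.1 + PySem.List.pyGetD calories i 0 - PySem.List.pyGetD calories (i - k) 0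
        (s, st.2 + pvScore s lower upper)) (s0, pvScore s0 lower upper)
    r.2

-- ===== PRECONDITION & SPEC =====
-- Pre_ excludes only k ≤ 0: there 'windows of size k' mean nothing, and A's values arise from
-- Python's negative-stop slice wraparound in calories[i:i+k] over len-k+1 degenerate windows —
-- a corner no one would specify; B returns 0 there.
def Pre_dist_plan_performance (calories : List Int) (k : Int) (lower : Int) (upper : Int) : Prop :=
  1 ≤ k
instance (calories : List Int) (k : Int) (lower : Int) (upper : Int) : Decidable (Pre_dist_plan_performance calories k lower upper) := by unfold Pre_dist_plan_performance; infer_instance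

def pvWitness_dist_plan_performance : List Int × Int × Int × Int := ([2, 5, 1, 4], 2, 3, 7)

def Spec_dist_plan_performance (calories : List Int) (k : Int) (lower : Int) (upper : Int) (out : Int) : Prop := out = dist_plan_performance_alt calories k lower upper
instance (calories : List Int) (k : Int) (lower : Int) (upper : Int) (out : Int) : Decidable (Spec_dist_plan_performance calories k lower upper out) := by unfold Spec_dist_plan_performance; infer_instance

-- ===== CLAIM (what is proved, stated in full; the proofs are below) =====
def Claim_equal_dist_plan_performance : Prop := ∀ (calories : List Int) (k : Int) (lower : Int) (upper : Int), Dom_dist_plan_performance calories k lower upper → Pre_dist_plan_performance calories k lower upper → Spec_dist_plan_performance calories k lower upper (dist_plan_performance calories k lower upper)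

-- ===== LEMMAS AND PROOFS =====

-- sum of the window of length k starting at j
def pvWin (xs : List Int) (k j : Nat) : Int := ((xs.drop j).take k).sum

theorem pvWin_slide (xs : List Int) (k j : Nat) (hk : 1 ≤ k) (h : j + k < xs.length) :
    pvWin xs k (j + 1) = pvWin xs k j + xs.getD (j + k) 0 - xs.getD j 0 := by
  obtain ⟨k', rfl⟩ : ∃ k', k = k' + 1 := ⟨k - 1, by omega⟩
  have hj : j < xs.length := by omega
  have hdrop : xs.drop j = xs[j] :: xs.drop (j + 1) := List.drop_eq_getElem_cons hj
  have htake : (xs.drop (j + 1)).take (k' + 1)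
      = (xs.drop (j + 1)).take k' ++ ((xs.drop (j + 1))[k']?).toList := List.take_add_one
  have hget : (xs.drop (j + 1))[k']? = some xs[j + 1 + k'] := by
    rw [List.getElem?_drop]
    exact List.getElem?_eq_getElem (by omega)
  have e1 : pvWin xs (k' + 1) j = xs[j] + ((xs.drop (j + 1)).take k').sum := by
    rw [pvWin, hdrop, List.take_succ_cons, List.sum_cons]
  have e2 : pvWin xs (k' + 1) (j + 1) = ((xs.drop (j + 1)).take k').sum + xs[j + 1 + k'] := by
    simp [pvWin, htake, hget]
  have g1 : xs.getD j 0 = xs[j] := List.getD_eq_getElem _ _ hj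
  have g2 : xs.getD (j + (k' + 1)) 0 = xs[j + 1 + k'] := by
    have := List.getD_eq_getElem xs 0 (show j + (k' + 1) < xs.length by omega)
    simpa [show j + (k' + 1) = j + 1 + k' by omega] using this
  rw [e1, e2, g1, g2]; ring

theorem pv_if_eq_add_score (lower upper t s : Int) :
    (if s < lower then t - 1 else if s > upper then t + 1 else t) = t + pvScore s lower upper := by
  unfold pvScore; split_ifs <;> ring

-- A = Σ_{j < m} score(win j), where m = (len - k + 1).toNat
theorem pvA_eq_sum (calories : List Int) (k lower upper : Int) (hk : 1 ≤ k) :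
    dist_plan_performance calories k lower upper
      = ((List.range ((calories.length : Int) - k + 1).toNat).map
          (fun j => pvScore (pvWin calories k.toNat j) lower upper)).sum := by
  have hkK : k = (k.toNat : Int) := (Int.toNat_of_nonneg (by omega)).symm
  unfold dist_plan_performance
  rw [PySem.List.pyRange_one, List.foldl_map]
  have hbody : ∀ (t : Int) (j : Nat),
      (fun total i =>
        let s := (PySem.List.slice calories (some i) (some (i + k))).sum
        if s < lower then total - 1 else if s > upper then total + 1 else total) t ((0:Int) + (j:Int))
      = t + pvScore (pvWin calories k.toNat j) lower upper := by
    intro t j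
    have hs : PySem.List.slice calories (some ((0:Int) + (j:Int))) (some ((0:Int) + (j:Int) + k))
        = (calories.drop j).take k.toNat := by
      rw [zero_add, hkK]
      exact PySem.List.slice_natCast_add calories j k.toNat
    simp only [hs]
    exact pv_if_eq_add_score lower upper t _
  simp only [sub_zero]
  refine Eq.trans (PySem.List.foldl_congr_mem _ _
      (fun (t : Int) (j : Nat) => t + pvScore (pvWin calories k.toNat j) lower upper) _
      (fun acc x _ => hbody acc x)) ?_
  rw [PySem.List.foldl_add, zero_add]

-- the sliding loop of B, as a sum
theorem pvB_loop (calories : List Int) (k lower upper : Int) (hk : 1 ≤ k)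
    (hkn : k ≤ (calories.length : Int)) :
    ∀ (j : Nat) (t : Int), k.toNat ≤ j → j ≤ calories.length →
      ((PySem.List.pyRange (j : Int) (calories.length : Int) 1).foldl
        (fun (st : Int × Int) i =>
          let s := st.1 + PySem.List.pyGetD calories i 0 - PySem.List.pyGetD calories (i - k) 0
          (s, st.2 + pvScore s lower upper)) (pvWin calories k.toNat (j - k.toNat), t)).2
      = t + ((List.range (calories.length - j)).map
          (fun i => pvScore (pvWin calories k.toNat (j - k.toNat + 1 + i)) lower upper)).sum := by
  have hkK : k = (k.toNat : Int) := (Int.toNat_of_nonneg (by omega)).symm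
  intro j t hkj hjn
  induction hm : calories.length - j generalizing j t with
  | zero =>
    have hj : j = calories.length := by omega
    rw [PySem.List.pyRange_one_eq_nil (by exact_mod_cast le_of_eq hj.symm)]
    simp [hj]
  | succ m ih =>
    have hjlt : j < calories.length := by omega
    rw [PySem.List.pyRange_one_cons (by exact_mod_cast hjlt)]
    rw [List.foldl_cons]
    have hidx : (j : Int) - k = ((j - k.toNat : Nat) : Int) := by
      rw [hkK]; omega
    have hs : pvWin calories k.toNat (j - k.toNat)
        + PySem.List.pyGetD calories (j : Int) 0
        - PySem.List.pyGetD calories ((j : Int) - k) 0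
        = pvWin calories k.toNat (j - k.toNat + 1) := by
      rw [hidx, PySem.List.pyGetD_natCast, PySem.List.pyGetD_natCast]
      rw [pvWin_slide calories k.toNat (j - k.toNat) (by omega) (by omega)]
      rw [show j - k.toNat + k.toNat = j from by omega]
    simp only [hs]
    have hcast : (j : Int) + 1 = ((j + 1 : Nat) : Int) := by push_cast; ring
    rw [hcast]
    rw [show j - k.toNat + 1 = (j + 1) - k.toNat from by omega]
    rw [ih (j + 1) (t + pvScore (pvWin calories k.toNat ((j + 1) - k.toNat)) lower upper)
        (by omega) (by omega) (by omega)]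
    rw [List.range_succ_eq_map, List.map_cons, List.sum_cons, List.map_map]
    have hmap : ∀ i ∈ List.range m,
        ((fun i => pvScore (pvWin calories k.toNat (j + 1 - k.toNat + i)) lower upper) ∘ Nat.succ) i
        = (fun i => pvScore (pvWin calories k.toNat (j + 1 - k.toNat + 1 + i)) lower upper) i := by
      intro i _
      simp only [Function.comp_apply]
      congr 2
      omega
    rw [List.map_congr_left hmap]
    simp only [Nat.add_zero]
    ring

theorem pv_main (calories : List Int) (k lower upper : Int) (hk : 1 ≤ k) :
    dist_plan_performance calories k lower upper
      = dist_plan_performance_alt calories k lower upper := by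
  have hkK : k = (k.toNat : Int) := (Int.toNat_of_nonneg (by omega)).symm
  unfold dist_plan_performance_alt
  by_cases hkn : (calories.length : Int) < k
  · rw [if_pos (Or.inr hkn)]
    unfold dist_plan_performance
    rw [PySem.List.pyRange_one_eq_nil (by omega)]
    rfl
  · replace hkn : k ≤ (calories.length : Int) := by omega
    rw [if_neg (by omega)]
    have hs0 : (PySem.List.slice calories none (some k)).sum = pvWin calories k.toNat 0 := by
      rw [PySem.List.slice_to _ (by omega)]
      simp [pvWin]
    rw [hs0]
    have hrange : PySem.List.pyRange k (calories.length : Int) 1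
        = PySem.List.pyRange ((k.toNat : Nat) : Int) (calories.length : Int) 1 := by
      rw [← hkK]
    rw [hrange]
    have hloop := pvB_loop calories k lower upper hk hkn k.toNat
      (pvScore (pvWin calories k.toNat 0) lower upper) (le_refl _) (by omega)
    rw [show k.toNat - k.toNat = 0 from by omega] at hloop
    rw [hloop]
    rw [pvA_eq_sum calories k lower upper hk]
    rw [show ((calories.length : Int) - k + 1).toNat = (calories.length - k.toNat) + 1 from by omega]
    rw [List.range_succ_eq_map, List.map_cons, List.sum_cons, List.map_map]
    have hmap : ∀ i ∈ List.range (calories.length - k.toNat),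
        ((fun j => pvScore (pvWin calories k.toNat j) lower upper) ∘ Nat.succ) i
        = (fun i => pvScore (pvWin calories k.toNat (0 + 1 + i)) lower upper) i := by
      intro i _
      simp only [Function.comp_apply]
      congr 2
      omega
    rw [List.map_congr_left hmap]

-- ===== VERDICT (by name: the statement is the Claim_ definition above) =====
theorem dist_plan_performance_spec : Claim_equal_dist_plan_performance := by
  intro calories k lower upper _ hpre
  unfold Spec_dist_plan_performance
  exact pv_main calories k lower upper hpre
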